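-- pv_equiv track=rewrite | github.com/PetitPandaRoux/python_katas | transform_word/transform_word.py | transforme_longueur
-- ===== SOURCE A (Python) =====
-- def transforme_longueur(mot_origine, mot_arrivee):
--     trajet = list()
--     mot_transforme = mot_origine
--     while len(mot_transforme) > len(mot_arrivee):
--         mot_transforme = reduit(mot_transforme)
--         trajet.append(mot_transforme)
--     while len(mot_transforme) < len(mot_arrivee):
--         lettre_manquante = mot_arrivee[len(mot_transforme)]
--         mot_transforme = augmente(mot_transforme, lettre_manquante)
--         trajet.append(mot_transforme)
--     return trajet
--
-- def reduit(mot):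
--     return mot[:len(mot)-1]
--
-- def augmente(mot,lettre_cible):
--     return mot+lettre_cible
-- ===== SOURCE B (Python) =====
-- def transforme_longueur(mot_origine, mot_arrivee):
--     n, m = len(mot_origine), len(mot_arrivee)
--     if n > m:
--         return [mot_origine[:k] for k in range(n - 1, m - 1, -1)]
--     return [mot_origine + mot_arrivee[n:j] for j in range(n + 1, m + 1)]
-- ===== Notes on version B (the rewrite author's own statement) =====
-- stated objective: simpler
-- what changed: Each trajectory word is computed directly from the two inputs as a slice expression over a range, replacing the two while-loops with a running accumulator and the reduit/augmente helpers.
import Mathlib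
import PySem

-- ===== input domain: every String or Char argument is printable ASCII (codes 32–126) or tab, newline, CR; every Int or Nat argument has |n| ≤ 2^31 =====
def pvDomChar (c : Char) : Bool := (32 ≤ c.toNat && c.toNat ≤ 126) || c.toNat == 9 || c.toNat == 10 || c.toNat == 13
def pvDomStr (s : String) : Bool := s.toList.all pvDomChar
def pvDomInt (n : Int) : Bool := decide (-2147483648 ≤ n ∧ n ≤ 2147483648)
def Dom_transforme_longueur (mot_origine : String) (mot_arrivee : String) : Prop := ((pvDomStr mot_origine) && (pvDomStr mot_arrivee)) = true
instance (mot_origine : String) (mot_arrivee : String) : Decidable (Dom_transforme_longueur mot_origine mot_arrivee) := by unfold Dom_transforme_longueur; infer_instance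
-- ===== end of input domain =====

-- B replaces A's two accumulator while-loops (with the reduit/augmente helpers) by direct
-- slice expressions over a range; objective: simpler, same cost.

-- ===== PORT A =====
-- helper reduit: mot[:len(mot)-1]
def pvReduit (mot : List Char) : List Char :=
  PySem.List.slice mot none (some ((mot.length : Int) - 1))

-- termination fact for the first while-loop (cited by decreasing_by)
theorem pvReduit_length_lt (mot : List Char) (h : 0 < mot.length) :
    (pvReduit mot).length < mot.length := by
  unfold pvReduit
  rw [PySem.List.slice_to _ (by omega : (0:Int) ≤ (mot.length : Int) - 1)]
  simp
  omega

-- first while-loop: shrink mot_transforme while it is longer than the target length;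
-- returns (the appended part of trajet, the final mot_transforme)
def pvShrink (mot : List Char) (tlen : Nat) : List (List Char) × List Char :=
  if _h : mot.length > tlen then
    let m' := pvReduit mot
    let r := pvShrink m' tlen
    (m' :: r.1, r.2)
  else ([], mot)
termination_by mot.length
decreasing_by exact pvReduit_length_lt mot (by omega)

-- second while-loop: augmente with mot_arrivee[len(mot_transforme)] while too short
def pvGrow (mot : List Char) (cible : List Char) : List (List Char) :=
  if _h : mot.length < cible.length then
    let lettre := PySem.List.pyGetD cible (mot.length : Int) ' '
    let m' := mot ++ [lettre]
    m' :: pvGrow m' cible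
  else []
termination_by cible.length - mot.length
decreasing_by simp; omega

def transforme_longueur (mot_origine : String) (mot_arrivee : String) : List String :=
  let r := pvShrink mot_origine.toList mot_arrivee.toList.length
  (r.1 ++ pvGrow r.2 mot_arrivee.toList).map String.ofList

-- ===== PORT B =====
def transforme_longueur_alt (mot_origine : String) (mot_arrivee : String) : List String :=
  let oL := mot_origine.toList
  let aL := mot_arrivee.toList
  if oL.length > aL.length then
    (PySem.List.pyRange ((oL.length : Int) - 1) ((aL.length : Int) - 1) (-1)).map
      (fun k => String.ofList (PySem.List.slice oL none (some k)))
  else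
    (PySem.List.pyRange ((oL.length : Int) + 1) ((aL.length : Int) + 1) 1).map
      (fun j => String.ofList (oL ++ PySem.List.slice aL (some (oL.length : Int)) (some j)))

-- ===== PRECONDITION & SPEC =====
def Spec_transforme_longueur (mot_origine : String) (mot_arrivee : String) (out : List String) : Prop := out = transforme_longueur_alt mot_origine mot_arrivee
instance (mot_origine : String) (mot_arrivee : String) (out : List String) : Decidable (Spec_transforme_longueur mot_origine mot_arrivee out) := by unfold Spec_transforme_longueur; infer_instance

-- ===== CLAIM (what is proved, stated in full; the proofs are below) =====
def Claim_equal_transforme_longueur : Prop := ∀ (mot_origine : String) (mot_arrivee : String), Dom_transforme_longueur mot_origine mot_arrivee → Spec_transforme_longueur mot_origine mot_arrivee (transforme_longueur mot_origine mot_arrivee)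

-- ===== LEMMAS AND PROOFS =====

theorem pvReduit_eq (mot : List Char) (h : 0 < mot.length) :
    pvReduit mot = mot.take (mot.length - 1) := by
  unfold pvReduit
  rw [PySem.List.slice_to _ (by omega : (0:Int) ≤ (mot.length : Int) - 1)]
  congr 1
  omega

-- characterisation of the first while-loop: trajet entries are prefixes of decreasing length
theorem pvShrink_eq (mot : List Char) (tlen : Nat) :
    pvShrink mot tlen =
      ((List.range (mot.length - tlen)).map (fun k => mot.take (mot.length - 1 - k)),
       mot.take tlen) := by
  fun_induction pvShrink mot tlen with
  | case1 mot h m' r ih =>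
      have hl : 0 < mot.length := by omega
      have hm : m' = mot.take (mot.length - 1) := pvReduit_eq mot hl
      have hml : m'.length = mot.length - 1 := by rw [hm]; simp
      simp only [r]
      rw [ih]
      simp only [Prod.mk.injEq]
      refine ⟨?_, ?_⟩
      · have hlen : mot.length - tlen = (mot.length - 1 - tlen) + 1 := by omega
        rw [hlen, List.range_succ_eq_map, List.map_cons, List.map_map, hml]
        congr 1
        apply List.map_congr_left
        intro k hk
        rw [List.mem_range] at hk
        rw [hm, List.take_take]
        simp only [Function.comp]
        congr 1
        omega
      · rw [hm, List.take_take]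
        congr 1
        omega
  | case2 mot h =>
      have : mot.length - tlen = 0 := by omega
      simp [this, List.take_of_length_le (by omega : mot.length ≤ tlen)]

-- characterisation of the second while-loop: each step appends one more letter of the tail
theorem pvGrow_eq (mot cible : List Char) :
    pvGrow mot cible =
      (List.range (cible.length - mot.length)).map
        (fun k => mot ++ (cible.drop mot.length).take (k + 1)) := by
  fun_induction pvGrow mot cible with
  | case1 mot h lettre m' ih =>
      have hn : mot.length < cible.length := h
      have hdrop : cible.drop mot.length = cible[mot.length] :: cible.drop (mot.length + 1) :=
        List.drop_eq_getElem_cons hn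
      have hlettre : lettre = cible[mot.length] := by
        simp only [lettre, PySem.List.pyGetD_natCast]
        exact List.getD_eq_getElem cible ' ' hn
      have hml : m'.length = mot.length + 1 := by simp [m']
      simp only [m'] at ih ⊢
      rw [ih, hml]
      have hlen : cible.length - mot.length = (cible.length - (mot.length + 1)) + 1 := by omega
      rw [hlen, List.range_succ_eq_map, List.map_cons, List.map_map]
      congr 1
      · rw [hdrop, hlettre]
        rfl
      · apply List.map_congr_left
        intro k hk
        rw [hdrop, hlettre]
        simp only [Function.comp_apply, List.take_succ_cons, List.append_assoc,
          List.singleton_append]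
  | case2 mot h =>
      have : cible.length - mot.length = 0 := by omega
      simp [this]

-- ===== VERDICT (by name: the statement is the Claim_ definition above) =====
theorem transforme_longueur_spec : Claim_equal_transforme_longueur := by
  intro o a _
  unfold Spec_transforme_longueur transforme_longueur transforme_longueur_alt
  simp only []
  set oL := o.toList with hoL
  set aL := a.toList with haL
  rw [pvShrink_eq, pvGrow_eq]
  by_cases h : oL.length > aL.length
  · rw [if_pos h]
    have hlen : (oL.take aL.length).length = aL.length := by simp; omega
    rw [hlen]
    simp only [Nat.sub_self, List.range_zero, List.map_nil, List.append_nil]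
    rw [PySem.List.pyRange_neg_one, List.map_map, List.map_map]
    have hcnt : (((oL.length : Int) - 1) - ((aL.length : Int) - 1)).toNat
        = oL.length - aL.length := by omega
    rw [hcnt]
    apply List.map_congr_left
    intro k hk
    rw [List.mem_range] at hk
    simp only [Function.comp_apply]
    congr 1
    rw [PySem.List.slice_to _ (by omega : (0:Int) ≤ (oL.length : Int) - 1 - (k : Int))]
    congr 1
    omega
  · rw [if_neg h]
    have hn : oL.length ≤ aL.length := by omega
    have h0 : oL.length - aL.length = 0 := by omega
    rw [h0]
    simp only [List.range_zero, List.map_nil, List.nil_append]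
    rw [List.take_of_length_le hn, PySem.List.pyRange_one, List.map_map, List.map_map]
    have hcnt : (((aL.length : Int) + 1) - ((oL.length : Int) + 1)).toNat
        = aL.length - oL.length := by omega
    rw [hcnt]
    apply List.map_congr_left
    intro k hk
    rw [List.mem_range] at hk
    simp only [Function.comp_apply]
    congr 1
    rw [PySem.List.slice_toNat _ (by omega) (by omega)]
    congr 1
    have h1 : ((oL.length : Int) + 1 + (k : Int)).toNat = oL.length + 1 + k := by omega
    rw [h1, Int.toNat_natCast]
    congr 1
    omega
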